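-- pv_equiv track=rewrite | github.com/HaoranLiu14/BugSum | SalientSentenceSelection/SalientSentenceSelection.py | ReconFullTVec
-- ===== SOURCE A (Python) =====
-- def VecAdd(Veca, Vecb):
--     VecLen = len(Veca)
--     answerList = []
--     for i in range(VecLen):
--         answerList.append(Veca[i]+Vecb[i])
--     return answerList
--
-- def ReconFullTVec(senVecList, chosenList):
--     FullTVec = []
--     vecLen = len(senVecList[0])
--     for i in range(vecLen):
--         FullTVec.append(0)
--     for i in chosenList:
--         FullTVec = VecAdd(FullTVec, senVecList[i])
--     return FullTVec
-- ===== SOURCE B (Python) =====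
-- def ReconFullTVec(senVecList, chosenList):
--     vecLen = len(senVecList[0])
--     return [sum(senVecList[i][dim] for i in chosenList) for dim in range(vecLen)]
-- ===== Notes on version B (the rewrite author's own statement) =====
-- stated objective: simpler
-- what changed: Replaces the running-accumulator fold with repeated VecAdd calls by a single per-dimension comprehension that sums senVecList[i][dim] over chosenList, removing the VecAdd helper and the zero-vector initialisation.
import Mathlib
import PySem

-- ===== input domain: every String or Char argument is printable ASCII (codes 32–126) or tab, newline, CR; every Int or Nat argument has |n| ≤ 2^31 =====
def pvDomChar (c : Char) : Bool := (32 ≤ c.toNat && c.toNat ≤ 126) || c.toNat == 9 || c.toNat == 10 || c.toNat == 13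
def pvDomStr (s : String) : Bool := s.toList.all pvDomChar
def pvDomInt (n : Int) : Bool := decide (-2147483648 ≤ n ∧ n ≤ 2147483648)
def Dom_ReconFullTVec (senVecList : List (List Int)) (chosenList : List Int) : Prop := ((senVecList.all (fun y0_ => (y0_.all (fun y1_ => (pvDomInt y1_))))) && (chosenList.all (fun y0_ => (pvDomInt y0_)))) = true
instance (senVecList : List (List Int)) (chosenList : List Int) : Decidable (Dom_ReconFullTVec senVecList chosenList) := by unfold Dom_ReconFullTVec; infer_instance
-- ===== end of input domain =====

-- B replaces A's running-accumulator fold of VecAdd with one per-dimension sum comprehension (simpler decomposition, same cost).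


-- ===== PORT A =====
def VecAddPort (Veca Vecb : List Int) : List Int :=
  (PySem.List.pyRange 0 (Veca.length : Int) 1).foldl
    (fun answerList i => answerList ++ [PySem.List.pyGetD Veca i 0 + PySem.List.pyGetD Vecb i 0]) []

def ReconFullTVec (senVecList : List (List Int)) (chosenList : List Int) : List Int :=
  let vecLen := (PySem.List.pyGetD senVecList 0 []).length
  let init := (PySem.List.pyRange 0 (vecLen : Int) 1).foldl (fun acc _ => acc ++ [(0 : Int)]) []
  chosenList.foldl (fun FullTVec i => VecAddPort FullTVec (PySem.List.pyGetD senVecList i [])) init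

-- ===== PORT B =====
def ReconFullTVec_alt (senVecList : List (List Int)) (chosenList : List Int) : List Int :=
  let vecLen := (PySem.List.pyGetD senVecList 0 []).length
  (List.range vecLen).map (fun (dim : Nat) =>
    chosenList.foldl (fun acc i => acc + PySem.List.pyGetD (PySem.List.pyGetD senVecList i []) (dim : Int) 0) 0)

-- ===== PRECONDITION & SPEC =====
-- Pre_: exactly the inputs where Python A returns normally: senVecList nonempty, every chosen
-- index in range (Python's negative wraparound allowed), and every selected row at least as
-- long as the first row (otherwise VecAdd's Vecb[i] raises IndexError).
def Pre_ReconFullTVec (senVecList : List (List Int)) (chosenList : List Int) : Prop :=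
  senVecList ≠ [] ∧ ∀ i ∈ chosenList, PySem.Raise.InRange senVecList.length i ∧
    (PySem.List.pyGetD senVecList 0 []).length ≤ (PySem.List.pyGetD senVecList i []).length
instance (senVecList : List (List Int)) (chosenList : List Int) : Decidable (Pre_ReconFullTVec senVecList chosenList) := by unfold Pre_ReconFullTVec; infer_instance
def pvWitness_ReconFullTVec : List (List Int) × List Int := ([[1, 2], [3, 4], [5, 6]], [0, 2, -1])

def Spec_ReconFullTVec (senVecList : List (List Int)) (chosenList : List Int) (out : List Int) : Prop := out = ReconFullTVec_alt senVecList chosenList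
instance (senVecList : List (List Int)) (chosenList : List Int) (out : List Int) : Decidable (Spec_ReconFullTVec senVecList chosenList out) := by unfold Spec_ReconFullTVec; infer_instance

-- ===== CLAIM (what is proved, stated in full; the proofs are below) =====
def Claim_equal_ReconFullTVec : Prop := ∀ (senVecList : List (List Int)) (chosenList : List Int), Dom_ReconFullTVec senVecList chosenList → Pre_ReconFullTVec senVecList chosenList → Spec_ReconFullTVec senVecList chosenList (ReconFullTVec senVecList chosenList)

-- ===== LEMMAS AND PROOFS =====
-- VecAdd as a per-index map.
lemma vecAddPort_eq (a b : List Int) :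
    VecAddPort a b = (List.range a.length).map (fun d => a.getD d 0 + b.getD d 0) := by
  unfold VecAddPort
  rw [PySem.List.foldl_append_singleton_eq_map, PySem.List.pyRange_zero_nat, List.map_map]
  simp [Function.comp_def, List.getD_eq_getElem?_getD]

-- A's fold of VecAdd computes, in each coordinate, the start value plus the per-coordinate sum.
lemma foldl_vecAdd (row : Int → List Int) (c : List Int) (v : List Int) :
    c.foldl (fun full i => VecAddPort full (row i)) v
      = (List.range v.length).map
          (fun d => v.getD d 0 + c.foldl (fun acc i => acc + (row i).getD d 0) 0) := by
  induction c generalizing v with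
  | nil =>
    simp only [List.foldl_nil]
    apply List.ext_getElem
    · simp
    · intro d h1 h2
      simp [List.getD_eq_getElem?_getD, List.getElem?_eq_getElem h1]
  | cons i rest ih =>
    simp only [List.foldl_cons]
    rw [ih, vecAddPort_eq]
    apply List.ext_getElem
    · simp
    · intro d h1 h2
      simp only [List.length_map, List.length_range] at h1 h2
      simp only [PySem.List.foldl_add, List.getElem_map, List.getElem_range,
        List.getD_eq_getElem?_getD]
      simp [h1, add_assoc]

-- The two ports agree on every input (the Lean ports are total; Pre_ marks where the PYTHONS return).
theorem ReconFullTVec_spec_aux (senVecList : List (List Int)) (chosenList : List Int) :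
    ReconFullTVec senVecList chosenList = ReconFullTVec_alt senVecList chosenList := by
  unfold ReconFullTVec ReconFullTVec_alt
  rw [foldl_vecAdd]
  have hinit : ((PySem.List.pyRange 0 ((PySem.List.pyGetD senVecList 0 []).length : Int) 1).foldl
      (fun acc _ => acc ++ [(0 : Int)]) [])
      = (List.range (PySem.List.pyGetD senVecList 0 []).length).map (fun _ => (0 : Int)) := by
    rw [PySem.List.foldl_append_singleton_eq_map, PySem.List.pyRange_zero_nat, List.map_map]
    simp [Function.comp_def, List.map_const']
  rw [hinit]
  apply List.ext_getElem
  · simp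
  · intro d h1 h2
    simp only [List.length_map, List.length_range] at h1 h2
    simp [List.getD_eq_getElem?_getD]

-- ===== VERDICT (by name: the statement is the Claim_ definition above) =====
theorem ReconFullTVec_spec : Claim_equal_ReconFullTVec := by
  intro senVecList chosenList _ _
  exact ReconFullTVec_spec_aux senVecList chosenList
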